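-- pv_equiv track=rewrite | github.com/JacksonLind/CTF_Hunter | CTF-Tools-main/ctf_hunter/analyzers/crypto_prng.py | _mt19937_untemper
-- ===== SOURCE A (Python) =====
-- def _mt19937_untemper(y: int) -> int:
--     """Invert the MT19937 output tempering transformation."""
--     # Undo y ^= (y >> 18)  — self-inverse for 32-bit
--     y ^= y >> 18
--     # Undo y ^= (y << 15) & 0xEFC60000  — self-inverse (bottom 15 bits unchanged)
--     y ^= (y << 15) & 0xEFC60000
--     # Undo y ^= (y << 7) & 0x9D2C5680  — iterative (bottom 7 bits unchanged each round)
--     t = y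
--     for _ in range(4):
--         t = y ^ ((t << 7) & 0x9D2C5680)
--     y = t & 0xFFFFFFFF
--     # Undo y ^= (y >> 11)  — iterative (top 11 bits unchanged each round)
--     t = y
--     for _ in range(3):
--         t = y ^ (t >> 11)
--     return t & 0xFFFFFFFF
-- ===== SOURCE B (Python) =====
-- def _mt19937_untemper(y: int) -> int:
--     """Invert the MT19937 output tempering transformation (bit-by-bit reconstruction)."""
--     # Undo y ^= (y >> 18)  — self-inverse for 32-bit
--     y ^= y >> 18
--     # Undo y ^= (y << 15) & 0xEFC60000  — self-inverse (bottom 15 bits unchanged)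
--     y ^= (y << 15) & 0xEFC60000
--     # Undo y ^= (y << 7) & 0x9D2C5680 — reconstruct bits 7..31 upward; low 7 bits are unchanged
--     x = y & 0x7F
--     for i in range(7, 32):
--         bit = ((y >> i) ^ ((x >> (i - 7)) & (0x9D2C5680 >> i))) & 1
--         x |= bit << i
--     # Undo y ^= (y >> 11) — reconstruct bits 20..0 downward; top 11 bits are unchanged
--     z = x & 0xFFE00000
--     for i in range(20, -1, -1):
--         bit = ((x >> i) ^ (z >> (i + 11))) & 1
--         z |= bit << i
--     return z & 0xFFFFFFFF
-- ===== Notes on version B (the rewrite author's own statement) =====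
-- stated objective: alternative
-- what changed: A's two iterative fixed-point loops (four and three whole-word passes) are replaced by explicit bit-by-bit reconstruction: for the left-shift-and-mask step each untempered bit is computed once, low-to-high, from the tempered bit and the already-recovered bit seven positions below; for the right-shift step symmetrically high-to-low; the two self-inverse first steps are kept identical.
import Mathlib
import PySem

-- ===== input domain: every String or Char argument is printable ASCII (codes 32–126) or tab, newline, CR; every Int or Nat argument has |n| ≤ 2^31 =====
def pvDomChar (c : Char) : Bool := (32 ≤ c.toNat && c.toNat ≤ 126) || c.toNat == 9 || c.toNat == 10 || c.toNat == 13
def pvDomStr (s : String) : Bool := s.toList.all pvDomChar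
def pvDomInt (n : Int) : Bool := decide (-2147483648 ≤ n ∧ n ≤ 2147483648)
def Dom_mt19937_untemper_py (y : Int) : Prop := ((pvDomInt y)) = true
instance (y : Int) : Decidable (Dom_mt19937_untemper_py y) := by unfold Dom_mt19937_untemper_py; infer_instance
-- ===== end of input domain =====

-- B replaces A's two fixed-point XOR-shift loops by explicit bit-by-bit reconstruction of the
-- untempered word (alternative decomposition, same exact return value for every int input).

-- ===== PORT A =====
-- ===== PORT B is the second def below =====
def mt19937_untemper_py (y : Int) : Int :=
  let y1 : Int := Int.xor y (y >>> (18 : Nat))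
  let y2 : Int := Int.xor y1 (Int.land (y1 <<< (15 : Nat)) 0xEFC60000)
  let t : Int := (PySem.List.pyRange 0 4 1).foldl
    (fun t _ => Int.xor y2 (Int.land (t <<< (7 : Nat)) 0x9D2C5680)) y2
  let y3 : Int := Int.land t 0xFFFFFFFF
  let s : Int := (PySem.List.pyRange 0 3 1).foldl
    (fun t _ => Int.xor y3 (t >>> (11 : Nat))) y3
  Int.land s 0xFFFFFFFF

def mt19937_untemper_py_alt (y : Int) : Int :=
  let y1 : Int := Int.xor y (y >>> (18 : Nat))
  let y2 : Int := Int.xor y1 (Int.land (y1 <<< (15 : Nat)) 0xEFC60000)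
  let x : Int := (PySem.List.pyRange 7 32 1).foldl
    (fun (x i : Int) => Int.lor x
      ((Int.land (Int.xor (y2 >>> i.toNat) (Int.land (x >>> (i - 7).toNat) ((0x9D2C5680 : Int) >>> i.toNat))) 1) <<< i.toNat))
    (Int.land y2 0x7F)
  let z : Int := (PySem.List.pyRange 20 (-1) (-1)).foldl
    (fun (z i : Int) => Int.lor z
      ((Int.land (Int.xor (x >>> i.toNat) (z >>> (i + 11).toNat)) 1) <<< i.toNat))
    (Int.land x 0xFFE00000)
  Int.land z 0xFFFFFFFF

-- ===== PRECONDITION & SPEC =====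
def Spec_mt19937_untemper_py (y : Int) (out : Int) : Prop := out = mt19937_untemper_py_alt y
instance (y : Int) (out : Int) : Decidable (Spec_mt19937_untemper_py y out) := by unfold Spec_mt19937_untemper_py; infer_instance

-- ===== CLAIM (what is proved, stated in full; the proofs are below) =====
def Claim_equal_mt19937_untemper_py : Prop := ∀ (y : Int), Dom_mt19937_untemper_py y → Spec_mt19937_untemper_py y (mt19937_untemper_py y)

-- ===== LEMMAS AND PROOFS =====
theorem pvTB_negSucc (n i : Nat) : (Int.negSucc n).testBit i = !(n.testBit i) := rfl

theorem pvTB_ofNat (n i : Nat) : (Int.ofNat n).testBit i = n.testBit i := rfl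

theorem pvTB_natCast (n i : Nat) : ((n : Int)).testBit i = n.testBit i := rfl

theorem pvSR_ofNat (n s : Nat) : (Int.ofNat n) >>> s = Int.ofNat (n >>> s) := rfl
theorem pvSR_negSucc (n s : Nat) : (Int.negSucc n) >>> s = Int.negSucc (n >>> s) := rfl
theorem pvSL_ofNat (n s : Nat) : (Int.ofNat n) <<< s = Int.ofNat (n <<< s) := rfl
theorem pvSL_negSucc (n s : Nat) : (Int.negSucc n) <<< s = Int.negSucc ((n + 1) <<< s - 1) := rfl

theorem pvTB_shiftRight (x : Int) (s i : Nat) : (x >>> s).testBit i = x.testBit (i + s) := by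
  cases x with
  | ofNat n =>
    rw [pvSR_ofNat, pvTB_ofNat, pvTB_ofNat, Nat.shiftRight_eq_div_pow, Nat.testBit_div_two_pow,
      Nat.add_comm]
  | negSucc n =>
    rw [pvSR_negSucc, pvTB_negSucc, pvTB_negSucc, Nat.shiftRight_eq_div_pow,
      Nat.testBit_div_two_pow, Nat.add_comm]

theorem pvTB_shiftLeft (x : Int) (s i : Nat) :
    (x <<< s).testBit i = (decide (s ≤ i) && x.testBit (i - s)) := by
  cases x with
  | ofNat n =>
    rw [pvSL_ofNat, pvTB_ofNat, pvTB_ofNat, Nat.testBit_shiftLeft]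
  | negSucc n =>
    have h1 : (n + 1) <<< s - 1 = 2 ^ s * n + (2 ^ s - 1) := by
      rw [Nat.shiftLeft_eq]
      have h2 : 0 < 2 ^ s := Nat.two_pow_pos s
      have : (n + 1) * 2 ^ s = 2 ^ s * n + 2 ^ s := by ring
      omega
    rw [pvSL_negSucc, pvTB_negSucc, pvTB_negSucc, h1,
      Nat.testBit_two_pow_mul_add n (Nat.sub_lt (Nat.two_pow_pos s) Nat.one_pos) i,
      Nat.testBit_two_pow_sub_one]
    by_cases h : i < s
    · simp [h, Nat.not_le.mpr h]
    · simp [h, Nat.le_of_not_lt h]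

theorem pvTB_mask32 (i : Nat) : (0xFFFFFFFF : Int).testBit i = decide (i < 32) := by
  have h : (0xFFFFFFFF : Int) = ((2 ^ 32 - 1 : Nat) : Int) := by norm_num
  rw [h, pvTB_natCast, Nat.testBit_two_pow_sub_one]

theorem pvTB_mask7 (i : Nat) : (0x7F : Int).testBit i = decide (i < 7) := by
  have h : (0x7F : Int) = ((2 ^ 7 - 1 : Nat) : Int) := by norm_num
  rw [h, pvTB_natCast, Nat.testBit_two_pow_sub_one]

theorem pvTB_maskTop (i : Nat) :
    (0xFFE00000 : Int).testBit i = (decide (21 ≤ i) && decide (i < 32)) := by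
  have h : (0xFFE00000 : Int) = ((2 ^ 21 * 2047 + 0 : Nat) : Int) := by norm_num
  rw [h, pvTB_natCast, Nat.testBit_two_pow_mul_add 2047 (Nat.two_pow_pos 21) i]
  by_cases hi : i < 21
  · simp [hi, Nat.not_le.mpr hi]
  · have h2047 : (2047 : Nat) = 2 ^ 11 - 1 := by norm_num
    rw [if_neg hi, h2047, Nat.testBit_two_pow_sub_one]
    have : (i - 21 < 11) = (i < 32) := by
      apply propext; omega
    simp [Nat.le_of_not_lt hi, this]

theorem pvTB_one (i : Nat) : (1 : Int).testBit i = decide (i = 0) := by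
  cases i with
  | zero => rfl
  | succ n =>
    show Nat.testBit 1 (n + 1) = false
    rw [Nat.testBit_add_one]
    simp

theorem pvTB_big {m i : Nat} (h : m ≤ i) : (Nat.testBit m (i + 1)) = false :=
  Nat.testBit_eq_false_of_lt (lt_of_le_of_lt h
    (lt_of_lt_of_le Nat.lt_two_pow_self (Nat.pow_le_pow_right (by omega) (by omega))))

theorem pvInt_ext {a b : Int} (h : ∀ i, a.testBit i = b.testBit i) : a = b := by
  cases a with
  | ofNat m =>
    cases b with
    | ofNat n => exact congrArg Int.ofNat (Nat.eq_of_testBit_eq fun i => h i)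
    | negSucc n =>
      exfalso
      have hi := h (max m n + 1)
      rw [pvTB_ofNat, pvTB_negSucc, pvTB_big (le_max_left m n), pvTB_big (le_max_right m n)] at hi
      simp at hi
  | negSucc m =>
    cases b with
    | ofNat n =>
      exfalso
      have hi := h (max m n + 1)
      rw [pvTB_ofNat, pvTB_negSucc, pvTB_big (le_max_left m n), pvTB_big (le_max_right m n)] at hi
      simp at hi
    | negSucc n =>
      have hmn : m = n := Nat.eq_of_testBit_eq fun i => by
        have hi := h i
        rw [pvTB_negSucc, pvTB_negSucc] at hi
        simpa using hi
      rw [hmn]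

-- ===== phase 1 =====
def pvGA (z t : Int) : Int := Int.xor z (Int.land (t <<< (7 : Nat)) 0x9D2C5680)

def pvSB (z x : Int) (m : Nat) : Int :=
  Int.lor x ((Int.land (Int.xor (z >>> m) (Int.land (x >>> (m - 7)) ((0x9D2C5680 : Int) >>> m))) 1) <<< m)

def pvTA (z : Int) : Int := pvGA z (pvGA z (pvGA z (pvGA z z)))
def pvAA (z : Int) : Int := Int.land (pvTA z) 0xFFFFFFFF
def pvFB (z : Int) : Int → Int → Int := fun x i =>
  Int.lor x ((Int.land (Int.xor (z >>> i.toNat) (Int.land (x >>> (i - 7).toNat) ((0x9D2C5680 : Int) >>> i.toNat))) 1) <<< i.toNat)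
def pvXB (z : Int) : Int := (PySem.List.pyRange 7 32 1).foldl (pvFB z) (Int.land z 0x7F)

theorem pvGA_bit (z t : Int) (i : Nat) :
    (pvGA z t).testBit i
      = (z.testBit i ^^ ((decide (7 ≤ i) && t.testBit (i - 7)) && (0x9D2C5680 : Int).testBit i)) := by
  simp [pvGA, Int.testBit_lxor, Int.testBit_land, pvTB_shiftLeft]

theorem pvGA_agree (z t t' : Int) (n : Nat) (h : ∀ j, j < n → t.testBit j = t'.testBit j) :
    ∀ i, i < n + 7 → (pvGA z t).testBit i = (pvGA z t').testBit i := by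
  intro i hi
  rw [pvGA_bit, pvGA_bit]
  by_cases h7 : 7 ≤ i
  · rw [h (i - 7) (by omega)]
  · simp [h7]

theorem pvGA_low (z t : Int) (i : Nat) (hi : i < 7) : (pvGA z t).testBit i = z.testBit i := by
  rw [pvGA_bit]
  simp [Nat.not_le.mpr hi]

theorem pvTA_agree (z : Int) :
    ∀ i, i < 28 → (pvGA z (pvGA z (pvGA z z))).testBit i = (pvTA z).testBit i := by
  have h01 : ∀ j, j < 7 → z.testBit j = (pvGA z z).testBit j := fun j hj => (pvGA_low z z j hj).symm
  have h12 := pvGA_agree z z (pvGA z z) 7 h01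
  have h23 := pvGA_agree z (pvGA z z) (pvGA z (pvGA z z)) 14 (fun j hj => h12 j (by omega))
  exact fun i hi =>
    pvGA_agree z (pvGA z (pvGA z z)) (pvGA z (pvGA z (pvGA z z))) 21
      (fun j hj => h23 j (by omega)) i (by omega)

theorem pvAA_high (z : Int) (i : Nat) (hi : 32 ≤ i) : (pvAA z).testBit i = false := by
  simp [pvAA, Int.testBit_land, pvTB_mask32, Nat.not_lt.mpr hi]

theorem pvAA_low (z : Int) (i : Nat) (hi : i < 7) : (pvAA z).testBit i = z.testBit i := by
  rw [pvAA, Int.testBit_land, pvTB_mask32, pvTA]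
  rw [pvGA_low z _ i hi]
  have h32 : i < 32 := by omega
  simp [h32]

theorem pvAA_rec (z : Int) (i : Nat) (h7 : 7 ≤ i) (h32 : i < 32) :
    (pvAA z).testBit i
      = (z.testBit i ^^ ((pvAA z).testBit (i - 7) && (0x9D2C5680 : Int).testBit i)) := by
  have hmask : ∀ j, j < 32 → (pvAA z).testBit j = (pvTA z).testBit j := by
    intro j hj
    simp [pvAA, Int.testBit_land, pvTB_mask32, hj]
  rw [hmask i h32, hmask (i - 7) (by omega)]
  conv_lhs => rw [pvTA]
  rw [pvGA_bit]
  rw [pvTA_agree z (i - 7) (by omega)]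
  simp [h7]

theorem pvSB_bit (z x : Int) (m i : Nat) (hm : 7 ≤ m) :
    (pvSB z x m).testBit i
      = (x.testBit i
         || (decide (i = m) && (z.testBit m ^^ (x.testBit (m - 7) && (0x9D2C5680 : Int).testBit m)))) := by
  by_cases him : i = m
  · subst him
    simp [pvSB, Int.testBit_lor, pvTB_shiftLeft, Int.testBit_land, pvTB_one, Int.testBit_lxor,
      pvTB_shiftRight]
  · by_cases hle : m ≤ i
    · have : i - m ≠ 0 := by omega
      simp [pvSB, Int.testBit_lor, pvTB_shiftLeft, Int.testBit_land, pvTB_one, Int.testBit_lxor,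
        pvTB_shiftRight, hle, this, him]
    · simp [pvSB, Int.testBit_lor, pvTB_shiftLeft, Int.testBit_land, pvTB_one, Int.testBit_lxor,
        pvTB_shiftRight, hle, him]

def pvInvB (z x : Int) (m : Nat) : Prop :=
  (∀ i, m ≤ i → x.testBit i = false)
  ∧ (∀ i, i < 7 → x.testBit i = z.testBit i)
  ∧ (∀ i, 7 ≤ i → i < m → x.testBit i = (z.testBit i ^^ (x.testBit (i - 7) && (0x9D2C5680 : Int).testBit i)))

theorem pvInvB_init (z : Int) : pvInvB z (Int.land z 0x7F) 7 := by
  refine ⟨?_, ?_, ?_⟩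
  · intro i hi
    simp [Int.testBit_land, pvTB_mask7, Nat.not_lt.mpr hi]
  · intro i hi
    simp [Int.testBit_land, pvTB_mask7, hi]
  · intro i h7 hm
    omega

theorem pvInvB_step (z x : Int) (m : Nat) (hm : 7 ≤ m) (h : pvInvB z x m) :
    pvInvB z (pvSB z x m) (m + 1) := by
  obtain ⟨hhi, hlo, hrec⟩ := h
  refine ⟨?_, ?_, ?_⟩
  · intro i hi
    rw [pvSB_bit z x m i hm]
    have h1 : x.testBit i = false := hhi i (by omega)
    have h2 : i ≠ m := by omega
    simp [h1, h2]
  · intro i hi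
    rw [pvSB_bit z x m i hm]
    have h2 : i ≠ m := by omega
    simp [h2, hlo i hi]
  · intro i h7 hm1
    rw [pvSB_bit z x m i hm, pvSB_bit z x m (i - 7) hm]
    have h3 : i - 7 ≠ m := by omega
    by_cases him : i = m
    · have hx : x.testBit m = false := hhi m le_rfl
      rw [him]
      simp [hx, show m - 7 ≠ m by omega]
    · have hi : i < m := by omega
      simp [him, h3, hrec i h7 hi]
theorem pvInvB_final (z : Int) : pvInvB z (pvXB z) 32 := by
  have hrange : PySem.List.pyRange 7 32 1 = (List.range 25).map (fun n => ((7 + n : Nat) : Int)) := by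
    decide
  have hfb : ∀ (x : Int) (n : Nat), pvFB z x ((7 + n : Nat) : Int) = pvSB z x (7 + n) := by
    intro x n
    have h1 : (((7 + n : Nat) : Int)).toNat = 7 + n := Int.toNat_natCast _
    have h2 : (((7 + n : Nat) : Int) - 7).toNat = n := by
      push_cast
      omega
    rw [pvFB, pvSB, h1, h2]
    norm_num
  rw [pvXB, hrange, List.foldl_map]
  have main : ∀ k, pvInvB z ((List.range k).foldl (fun x n => pvFB z x ((7 + n : Nat) : Int)) (Int.land z 0x7F)) (7 + k) := by
    intro k
    induction k with
    | zero => exact pvInvB_init z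
    | succ k ih =>
      rw [List.range_succ, List.foldl_append]
      simp only [List.foldl_cons, List.foldl_nil]
      rw [hfb]
      exact pvInvB_step z _ (7 + k) (by omega) ih
  exact main 25

theorem pvPhase1 (z : Int) : pvAA z = pvXB z := by
  obtain ⟨hhi, hlo, hrec⟩ := pvInvB_final z
  apply pvInt_ext
  intro i
  induction i using Nat.strong_induction_on with
  | _ i ih =>
    by_cases h32 : 32 ≤ i
    · rw [pvAA_high z i h32, hhi i h32]
    · by_cases h7 : i < 7
      · rw [pvAA_low z i h7, hlo i h7]
      · rw [pvAA_rec z i (by omega) (by omega), hrec i (by omega) (by omega),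
          ih (i - 7) (by omega)]

-- ===== phase 2 =====
def pvGS (w t : Int) : Int := Int.xor w (t >>> (11 : Nat))
def pvAS (w : Int) : Int := Int.land (pvGS w (pvGS w (pvGS w w))) 0xFFFFFFFF
def pvSC (x w : Int) (m : Nat) : Int :=
  Int.lor w ((Int.land (Int.xor (x >>> m) (w >>> (m + 11))) 1) <<< m)
def pvFC (x : Int) : Int → Int → Int := fun w i =>
  Int.lor w ((Int.land (Int.xor (x >>> i.toNat) (w >>> (i + 11).toNat)) 1) <<< i.toNat)
def pvZB (x : Int) : Int :=
  Int.land ((PySem.List.pyRange 20 (-1) (-1)).foldl (pvFC x) (Int.land x 0xFFE00000)) 0xFFFFFFFF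

theorem pvGS_bit (w t : Int) (i : Nat) :
    (pvGS w t).testBit i = (w.testBit i ^^ t.testBit (i + 11)) := by
  simp [pvGS, Int.testBit_lxor, pvTB_shiftRight]

theorem pvAS_high (w : Int) (i : Nat) (hi : 32 ≤ i) : (pvAS w).testBit i = false := by
  simp [pvAS, Int.testBit_land, pvTB_mask32, Nat.not_lt.mpr hi]

theorem pvS1_high (w : Int) (hw : ∀ i, 32 ≤ i → w.testBit i = false) :
    ∀ i, 32 ≤ i → (pvGS w w).testBit i = false := by
  intro i hi
  rw [pvGS_bit, hw i hi, hw (i + 11) (by omega)]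
  rfl

theorem pvS2_high (w : Int) (hw : ∀ i, 32 ≤ i → w.testBit i = false) :
    ∀ i, 32 ≤ i → (pvGS w (pvGS w w)).testBit i = false := by
  intro i hi
  rw [pvGS_bit, hw i hi, pvS1_high w hw (i + 11) (by omega)]
  rfl

theorem pvAgree12 (w : Int) (hw : ∀ i, 32 ≤ i → w.testBit i = false) :
    ∀ j, 22 ≤ j → (pvGS w w).testBit j = (pvGS w (pvGS w w)).testBit j := by
  intro j hj
  rw [pvGS_bit, pvGS_bit]
  by_cases h32 : 32 ≤ j + 11
  · rw [hw (j + 11) h32, pvS1_high w hw (j + 11) h32]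
  · omega

theorem pvAgree23 (w : Int) (hw : ∀ i, 32 ≤ i → w.testBit i = false) :
    ∀ j, 11 ≤ j → (pvGS w (pvGS w w)).testBit j = (pvGS w (pvGS w (pvGS w w))).testBit j := by
  intro j hj
  conv_lhs => rw [pvGS_bit]
  conv_rhs => rw [pvGS_bit]
  rw [pvAgree12 w hw (j + 11) (by omega)]

theorem pvAS_top (w : Int) (hw : ∀ i, 32 ≤ i → w.testBit i = false)
    (i : Nat) (h21 : 21 ≤ i) (h32 : i < 32) : (pvAS w).testBit i = w.testBit i := by
  rw [pvAS, Int.testBit_land, pvTB_mask32, pvGS_bit, pvS2_high w hw (i + 11) (by omega)]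
  simp [h32]

theorem pvAS_rec (w : Int) (hw : ∀ i, 32 ≤ i → w.testBit i = false)
    (i : Nat) (h21 : i < 21) :
    (pvAS w).testBit i = (w.testBit i ^^ (pvAS w).testBit (i + 11)) := by
  have hm : ∀ j, j < 32 → (pvAS w).testBit j
      = (pvGS w (pvGS w (pvGS w w))).testBit j := by
    intro j hj
    simp [pvAS, Int.testBit_land, pvTB_mask32, hj]
  rw [hm i (by omega), hm (i + 11) (by omega)]
  conv_lhs => rw [pvGS_bit]
  rw [pvAgree23 w hw (i + 11) (by omega)]

theorem pvSC_bit (x w : Int) (m i : Nat) :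
    (pvSC x w m).testBit i
      = (w.testBit i || (decide (i = m) && (x.testBit m ^^ w.testBit (m + 11)))) := by
  by_cases him : i = m
  · rw [him]
    simp [pvSC, Int.testBit_lor, pvTB_shiftLeft, Int.testBit_land, pvTB_one, Int.testBit_lxor,
      pvTB_shiftRight]
  · by_cases hle : m ≤ i
    · have hne : i - m ≠ 0 := by omega
      simp [pvSC, Int.testBit_lor, pvTB_shiftLeft, Int.testBit_land, pvTB_one, Int.testBit_lxor,
        pvTB_shiftRight, hle, hne, him]
    · simp [pvSC, Int.testBit_lor, pvTB_shiftLeft, Int.testBit_land, pvTB_one, Int.testBit_lxor,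
        pvTB_shiftRight, hle, him]

def pvInvC (x w : Int) (m : Nat) : Prop :=
  (∀ i, 32 ≤ i → w.testBit i = false)
  ∧ (∀ i, i < m → w.testBit i = false)
  ∧ (∀ i, m ≤ i → 21 ≤ i → i < 32 → w.testBit i = x.testBit i)
  ∧ (∀ i, m ≤ i → i < 21 → w.testBit i = (x.testBit i ^^ w.testBit (i + 11)))

theorem pvInvC_init (x : Int) : pvInvC x (Int.land x 0xFFE00000) 21 := by
  refine ⟨?_, ?_, ?_, ?_⟩
  · intro i hi
    simp [Int.testBit_land, pvTB_maskTop, Nat.not_lt.mpr hi]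
  · intro i hi
    simp [Int.testBit_land, pvTB_maskTop, Nat.not_le.mpr hi]
  · intro i h1 h2 h3
    simp [Int.testBit_land, pvTB_maskTop, h2, h3]
  · intro i h1 h2
    omega
theorem pvInvC_step (x w : Int) (m : Nat) (hm : m < 21) (h : pvInvC x w (m + 1)) :
    pvInvC x (pvSC x w m) m := by
  obtain ⟨hhi, hlo, htop, hrec⟩ := h
  refine ⟨?_, ?_, ?_, ?_⟩
  · intro i hi
    rw [pvSC_bit]
    simp [hhi i hi, show i ≠ m by omega]
  · intro i hi
    rw [pvSC_bit]
    simp [hlo i (by omega), show i ≠ m by omega]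
  · intro i h1 h2 h3
    rw [pvSC_bit]
    simp [htop i (by omega) h2 h3, show i ≠ m by omega]
  · intro i h1 h2
    rw [pvSC_bit, pvSC_bit]
    have hne : i + 11 ≠ m := by omega
    by_cases him : i = m
    · rw [him]
      have hw0 : w.testBit m = false := hlo m (by omega)
      simp [hw0]
    · have h1' : m + 1 ≤ i := by omega
      simp [him, hne, hrec i h1' h2]
theorem pvInvC_final (x : Int) :
    pvInvC x ((PySem.List.pyRange 20 (-1) (-1)).foldl (pvFC x) (Int.land x 0xFFE00000)) 0 := by
  have hrange : PySem.List.pyRange 20 (-1) (-1)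
      = (List.range 21).map (fun n => ((20 - n : Nat) : Int)) := by decide
  have hfc : ∀ (w : Int) (n : Nat), n ≤ 20 →
      pvFC x w ((20 - n : Nat) : Int) = pvSC x w (20 - n) := by
    intro w n hn
    have h1 : (((20 - n : Nat) : Int)).toNat = 20 - n := Int.toNat_natCast _
    have h2 : (((20 - n : Nat) : Int) + 11).toNat = (20 - n) + 11 := by
      omega
    rw [pvFC, pvSC, h1, h2]
  rw [hrange, List.foldl_map]
  have main : ∀ k, k ≤ 21 →
      pvInvC x ((List.range k).foldl (fun w n => pvFC x w ((20 - n : Nat) : Int))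
        (Int.land x 0xFFE00000)) (21 - k) := by
    intro k
    induction k with
    | zero => intro _; exact pvInvC_init x
    | succ k ih =>
      intro hk
      rw [List.range_succ, List.foldl_append]
      simp only [List.foldl_cons, List.foldl_nil]
      rw [hfc _ k (by omega), show 21 - (k + 1) = 20 - k by omega]
      apply pvInvC_step x _ (20 - k) (by omega)
      rw [show 20 - k + 1 = 21 - k by omega]
      exact ih (by omega)
  have h := main 21 (by omega)
  simpa using h

theorem pvPhase2 (w : Int) (hw : ∀ i, 32 ≤ i → w.testBit i = false) : pvAS w = pvZB w := by
  obtain ⟨hhi, hlo, htop, hrec⟩ := pvInvC_final w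
  set zr := (PySem.List.pyRange 20 (-1) (-1)).foldl (pvFC w) (Int.land w 0xFFE00000) with hzr
  have hzb : ∀ i, i < 32 → (pvZB w).testBit i = zr.testBit i := by
    intro i hi
    simp [pvZB, Int.testBit_land, pvTB_mask32, hi, hzr]
  have hzbh : ∀ i, 32 ≤ i → (pvZB w).testBit i = false := by
    intro i hi
    simp [pvZB, Int.testBit_land, pvTB_mask32, Nat.not_lt.mpr hi]
  apply pvInt_ext
  intro i
  have main : ∀ n i, 32 - i ≤ n → (pvAS w).testBit i = (pvZB w).testBit i := by
    intro n
    induction n with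
    | zero =>
      intro i hi
      rw [pvAS_high w i (by omega), hzbh i (by omega)]
    | succ n ih =>
      intro i hi
      by_cases h32 : 32 ≤ i
      · rw [pvAS_high w i h32, hzbh i h32]
      · by_cases h21 : 21 ≤ i
        · rw [pvAS_top w hw i h21 (by omega), hzb i (by omega),
            htop i (by omega) h21 (by omega)]
        · rw [pvAS_rec w hw i (by omega), hzb i (by omega),
            hrec i (by omega) (by omega), ih (i + 11) (by omega)]
          by_cases h' : i + 11 < 32
          · rw [hzb (i + 11) h']
          · rw [hzbh (i + 11) (by omega), hlo (i + 11)]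
            omega
  exact main 32 i (by omega)

def pvZ (y : Int) : Int :=
  Int.xor (Int.xor y (y >>> (18 : Nat)))
    (Int.land ((Int.xor y (y >>> (18 : Nat))) <<< (15 : Nat)) 0xEFC60000)

theorem pvA_eq (y : Int) : mt19937_untemper_py y = pvAS (pvAA (pvZ y)) := by
  dsimp only [mt19937_untemper_py, pvAS, pvAA, pvTA, pvGS, pvGA, pvZ]
  rfl

theorem pvB_eq (y : Int) : mt19937_untemper_py_alt y = pvZB (pvXB (pvZ y)) := by
  dsimp only [mt19937_untemper_py_alt, pvZB, pvXB, pvFB, pvFC, pvZ]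
  rfl

theorem pvMain (y : Int) : mt19937_untemper_py y = mt19937_untemper_py_alt y := by
  rw [pvA_eq, pvB_eq, pvPhase1]
  exact pvPhase2 (pvXB (pvZ y)) (pvInvB_final (pvZ y)).1

-- ===== VERDICT (by name: the statement is the Claim_ definition above) =====
theorem mt19937_untemper_py_spec : Claim_equal_mt19937_untemper_py := by
  intro y _
  show mt19937_untemper_py y = mt19937_untemper_py_alt y
  exact pvMain y
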